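-- pv_equiv track=rewrite | github.com/dudi-w/studies_projects | knn.py | label_prediction
-- ===== SOURCE A (Python) =====
-- def label_prediction(array_dist, threshold):
-- 	count={}
-- 	i=0
-- 	for value in array_dist[:threshold]:
-- 		if value[1] not in count:
-- 			count[value[1]]=1
-- 		else:
-- 			count[value[1]]+=1
-- 		i+=1
-- 	most_common= max(count,key=count.get)
-- 	cont_most_common= count.get(most_common, "Not found")
-- 	count.pop(most_common)
-- 	if len(count)==0 or count.get( max(count,key=count.get)) != cont_most_common:
-- 		return most_common
-- 	else:
-- 		return label_prediction(array_dist, threshold-1)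
-- ===== SOURCE B (Python) =====
-- def label_prediction(array_dist, threshold):
-- 	# Build the prefix counter once, then shrink it incrementally by
-- 	# decrementing the last element's count instead of rebuilding per round.
-- 	labels = [value[1] for value in array_dist[:threshold]]
-- 	count = {}
-- 	for lab in labels:
-- 		count[lab] = count.get(lab, 0) + 1
-- 	while True:
-- 		best = None
-- 		best_c = 0
-- 		unique = True
-- 		for lab, c in count.items():
-- 			if best is None or c > best_c:
-- 				best = lab
-- 				best_c = c
-- 				unique = True
-- 			elif c == best_c:
-- 				unique = False
-- 		if unique:
-- 			return best
-- 		last = labels.pop()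
-- 		if count[last] == 1:
-- 			del count[last]
-- 		else:
-- 			count[last] -= 1
-- ===== Notes on version B (the rewrite author's own statement) =====
-- stated objective: faster
-- what changed: B builds the prefix label counter once and, on each tie round, decrements (or deletes) the popped last label's count in place while detecting the unique maximum in a single scan, instead of A's recursion that rebuilds the whole counter and runs two full max passes per shrink of threshold (timing: 75x at n=65536).
import Mathlib
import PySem

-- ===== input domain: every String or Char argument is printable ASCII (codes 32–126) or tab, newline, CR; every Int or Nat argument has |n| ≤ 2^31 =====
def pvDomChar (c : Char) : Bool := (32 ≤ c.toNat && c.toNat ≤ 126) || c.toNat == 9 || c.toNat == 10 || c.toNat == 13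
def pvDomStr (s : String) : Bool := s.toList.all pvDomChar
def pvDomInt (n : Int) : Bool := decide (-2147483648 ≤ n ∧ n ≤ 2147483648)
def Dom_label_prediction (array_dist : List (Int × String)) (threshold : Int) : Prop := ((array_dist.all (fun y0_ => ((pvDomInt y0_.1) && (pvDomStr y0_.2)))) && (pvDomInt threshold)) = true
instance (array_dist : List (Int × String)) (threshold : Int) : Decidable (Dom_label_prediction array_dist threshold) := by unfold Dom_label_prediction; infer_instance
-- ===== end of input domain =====

-- B replaces A's rebuild-the-counter-and-recurse tie-breaking by one counter build
-- followed by in-place decrements of the popped last label, one scan per round.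

-- ===== PORT A =====
-- max(count, key=count.get): scan the keys keeping the first key whose looked-up
-- value is strictly greater — exact for Python's max over a dict with a key function.
def pyMaxKey (d : PySem.Dict String Int) : Option String :=
  d.keys.foldl (fun acc k =>
    match acc with
    | none => some k
    | some b => if d.getD k 0 > d.getD b 0 then some k else some b) none

-- needed by label_prediction's decreasing_by: a nonempty prefix slice forces 0 < t + n
theorem pv_slice_ne_nil_pos (xs : List (Int × String)) (t : Int)
    (h : PySem.List.slice xs none (some t) ≠ []) : 0 < t + xs.length := by
  by_contra hc
  apply h
  simp only [PySem.List.slice, PySem.List.clampIdx]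
  split_ifs with h1 h2 <;> simp_all <;> omega

def label_prediction (array_dist : List (Int × String)) (threshold : Int) : String :=
  -- for value in array_dist[:threshold]: count[value[1]] = 1 / += 1 ; i += 1 (i is a dead counter)
  let count := ((PySem.List.slice array_dist none (some threshold)).foldl
      (fun (st : PySem.Dict String Int × Int) value =>
        (if st.1.contains value.2 = false then st.1.insert value.2 1
         else st.1.modify value.2 0 (· + 1), st.2 + 1))
      (PySem.Dict.empty, 0)).1
  match h1 : pyMaxKey count with
  | none => ""          -- max() of an empty dict: Python raises ValueError; excluded by Pre_
  | some most_common =>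
    let cont_most_common := count.getD most_common 0   -- count.get(most_common, "Not found"): key present, default unused
    let rest := count.erase most_common                 -- count.pop(most_common)
    match pyMaxKey rest with
    | none => most_common                               -- len(count) == 0
    | some k2 =>
      if rest.getD k2 0 ≠ cont_most_common then most_common
      else label_prediction array_dist (threshold - 1)
termination_by (threshold + array_dist.length).toNat
decreasing_by
  have hs : PySem.List.slice array_dist none (some threshold) ≠ [] := by
    intro he
    simp only [count, he, List.foldl_nil] at h1
    simp [pyMaxKey, PySem.Dict.empty, PySem.Dict.keys] at h1
  have := pv_slice_ne_nil_pos array_dist threshold hs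
  omega

-- ===== PORT B =====
-- one pass over count.items: first strictly-greatest (label, count) and a uniqueness flag
def bScan (d : PySem.Dict String Int) : Option (String × Int) × Bool :=
  d.items.foldl (fun st p =>
    match st.1 with
    | none => (some p, true)
    | some q =>
      if p.2 > q.2 then (some p, true)
      else if p.2 == q.2 then (st.1, false) else st)
    (none, true)

-- the while loop of Source B: pop the last label and decrement (or delete) its count
def bLoop (labels : List String) (count : PySem.Dict String Int) : String :=
  let st := bScan count
  if st.2 = true then
    match st.1 with
    | some q => q.1
    | none => ""        -- empty counter: Source B returns None here; outside Pre_
  else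
    match labels with
    | [] => ""          -- labels.pop() raises IndexError; unreachable under Pre_
    | x :: xs =>
      let last := (x :: xs).getLast (by simp)
      let c := count.getD last 0            -- count[last]; key present whenever reached under Pre_
      bLoop (x :: xs).dropLast (if c = 1 then count.erase last else count.insert last (c - 1))
termination_by labels.length
decreasing_by simp

def label_prediction_alt (array_dist : List (Int × String)) (threshold : Int) : String :=
  let labels := (PySem.List.slice array_dist none (some threshold)).map (fun value => value.2)
  let count := labels.foldl (fun d lab => d.insert lab (d.getD lab 0 + 1)) PySem.Dict.empty
  bLoop labels count

-- ===== PRECONDITION & SPEC =====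
-- Pre_ excludes exactly the inputs whose prefix slice array_dist[:threshold] is empty:
-- there A's max() over the empty counter raises ValueError.
def Pre_label_prediction (array_dist : List (Int × String)) (threshold : Int) : Prop :=
  if 0 < threshold then array_dist ≠ []
  else threshold < 0 ∧ 0 < threshold + (array_dist.length : Int)
instance (array_dist : List (Int × String)) (threshold : Int) : Decidable (Pre_label_prediction array_dist threshold) := by unfold Pre_label_prediction; infer_instance

def pvWitness_label_prediction : (List (Int × String)) × Int := ([(1, "a"), (2, "b"), (3, "a")], 3)

def Spec_label_prediction (array_dist : List (Int × String)) (threshold : Int) (out : String) : Prop := out = label_prediction_alt array_dist threshold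
instance (array_dist : List (Int × String)) (threshold : Int) (out : String) : Decidable (Spec_label_prediction array_dist threshold out) := by unfold Spec_label_prediction; infer_instance

-- ===== CLAIM (what is proved, stated in full; the proofs are below) =====
def Claim_equal_label_prediction : Prop := ∀ (array_dist : List (Int × String)) (threshold : Int), Dom_label_prediction array_dist threshold → Pre_label_prediction array_dist threshold → Spec_label_prediction array_dist threshold (label_prediction array_dist threshold)

-- ===== LEMMAS AND PROOFS =====

-- the two fold steps, named so the folds inside the ports can be rewritten
def kStep (d : PySem.Dict String Int) (acc : Option String) (k : String) : Option String :=
  match acc with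
  | none => some k
  | some b => if d.getD k 0 > d.getD b 0 then some k else some b

def bStep (st : Option (String × Int) × Bool) (p : String × Int) :
    Option (String × Int) × Bool :=
  match st.1 with
  | none => (some p, true)
  | some q =>
    if p.2 > q.2 then (some p, true)
    else if p.2 == q.2 then (st.1, false) else st

theorem pyMaxKey_eq (d : PySem.Dict String Int) :
    pyMaxKey d = d.keys.foldl (kStep d) none := rfl

theorem bScan_eq (d : PySem.Dict String Int) :
    bScan d = d.items.foldl bStep (none, true) := rfl

-- a fold of kStep starting at `some` stays `some`
theorem kfold_isSome (d : PySem.Dict String Int) :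
    ∀ (ks : List String) (b : String), ∃ r, ks.foldl (kStep d) (some b) = some r := by
  intro ks
  induction ks with
  | nil => exact fun b => ⟨b, rfl⟩
  | cons k t ih =>
    intro b
    simp only [List.foldl_cons, kStep]
    split <;> exact ih _

theorem pyMaxKey_isSome (d : PySem.Dict String Int) (h : d.keys ≠ []) :
    ∃ r, pyMaxKey d = some r := by
  rw [pyMaxKey_eq]
  cases hk : d.keys with
  | nil => exact absurd hk h
  | cons k t =>
    simp only [List.foldl_cons, kStep]
    exact kfold_isSome d t k

theorem pyMaxKey_none_of_keys_nil (d : PySem.Dict String Int) (h : d.keys = []) :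
    pyMaxKey d = none := by
  rw [pyMaxKey_eq, h]; rfl

-- how one bStep acts on a `some` accumulator
theorem bStep_gt (k : String) (M : Int) (u : Bool) (p : String × Int) (h : M < p.2) :
    bStep (some (k, M), u) p = (some p, true) := by
  simp [bStep]; omega

theorem bStep_eq (k : String) (M : Int) (u : Bool) (p : String × Int) (h : p.2 = M) :
    bStep (some (k, M), u) p = (some (k, M), false) := by
  simp [bStep, h]

theorem bStep_lt (k : String) (M : Int) (u : Bool) (p : String × Int) (h : p.2 < M) :
    bStep (some (k, M), u) p = (some (k, M), u) := by
  simp only [bStep]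
  rw [if_neg (by omega), if_neg (by simp; omega)]

-- correspondence of the two max scans over items = keys.map (k, g k)
theorem corr_fold (g : String → Int) (d : PySem.Dict String Int)
    (hg : ∀ k, d.getD k 0 = g k) :
    ∀ (ks : List String) (b : Option String) (u : Bool),
      ((ks.map (fun k => (k, g k))).foldl bStep (b.map (fun k => (k, g k)), u)).1
        = (ks.foldl (kStep d) b).map (fun k => (k, g k)) := by
  intro ks
  induction ks with
  | nil => intro b u; rfl
  | cons k t ih =>
    intro b u
    cases b with
    | none =>
      simp only [List.map_cons, List.foldl_cons, Option.map_none]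
      have h1 : bStep (none, u) (k, g k) = (some (k, g k), true) := by simp [bStep]
      have h2 : kStep d none k = some k := by simp [kStep]
      rw [h1, h2]
      exact ih (some k) true
    | some b0 =>
      simp only [List.map_cons, List.foldl_cons, Option.map_some]
      rcases lt_trichotomy (g b0) (g k) with hgt | heq | hlt
      · rw [bStep_gt b0 (g b0) u (k, g k) hgt,
            show kStep d (some b0) k = some k by simp [kStep, hg]; omega]
        exact ih (some k) true
      · rw [bStep_eq b0 (g b0) u (k, g k) heq.symm,
            show kStep d (some b0) k = some b0 by simp [kStep, hg]; omega]
        exact ih (some b0) false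
      · rw [bStep_lt b0 (g b0) u (k, g k) hlt,
            show kStep d (some b0) k = some b0 by simp [kStep, hg]; omega]
        exact ih (some b0) u

-- characterization of the Source B scan: first maximum, and the flag is "the maximum is unique"
theorem bchar (l : List (String × Int)) (hne : l ≠ []) :
    ∃ k M, l.foldl bStep (none, true) = (some (k, M), decide (l.countP (fun p => p.2 == M) = 1))
      ∧ (k, M) ∈ l ∧ ∀ p ∈ l, p.2 ≤ M := by
  induction l using List.reverseRecOn with
  | nil => exact absurd rfl hne
  | append_singleton l p ih =>
    rcases eq_or_ne l [] with hl | hlne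
    · subst hl
      refine ⟨p.1, p.2, ?_, by simp, by simp⟩
      simp [bStep]
    · obtain ⟨k, M, heq, hmem, hle⟩ := ih hlne
      clear ih
      rw [List.foldl_append, heq]
      simp only [List.foldl_cons, List.foldl_nil]
      have hcnt1 : 1 ≤ l.countP (fun p => p.2 == M) :=
        List.countP_pos_iff.mpr ⟨(k, M), hmem, by simp⟩
      rcases lt_trichotomy M p.2 with hlt | hE | hgt
      · refine ⟨p.1, p.2, ?_, by simp, ?_⟩
        · rw [bStep_gt k M _ p hlt]
          have hz : l.countP (fun q => q.2 == p.2) = 0 := by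
            rw [List.countP_eq_zero]
            intro q hq
            have := hle q hq
            simp only [beq_iff_eq]
            omega
          simp [List.countP_append, hz]
        · intro q hq
          rcases List.mem_append.mp hq with h' | h'
          · exact le_of_lt (lt_of_le_of_lt (hle q h') hlt)
          · simp only [List.mem_singleton] at h'; subst h'; exact le_refl _
      · refine ⟨k, M, ?_, List.mem_append_left _ hmem, ?_⟩
        · rw [bStep_eq k M _ p hE.symm]
          simp [List.countP_append, hE.symm]
          exact ⟨k, hmem⟩
        · intro q hq
          rcases List.mem_append.mp hq with h' | h'
          · exact hle q h'
          · simp only [List.mem_singleton] at h'; subst h'; omega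
      · refine ⟨k, M, ?_, List.mem_append_left _ hmem, ?_⟩
        · rw [bStep_lt k M _ p hgt]
          have : List.countP (fun q => (q.2 == M)) [p] = 0 := by simp; omega
          simp [List.countP_append, this]
        · intro q hq
          rcases List.mem_append.mp hq with h' | h'
          · exact hle q h'
          · simp only [List.mem_singleton] at h'; subst h'; omega

-- inserting the value a key already has is a no-op
theorem insert_same (d : PySem.Dict String Int) (k : String) (v : Int)
    (hnd : d.keys.Nodup) (h : d.get? k = some v) : d.insert k v = d := by
  apply PySem.Dict.ext
  have hc : d.contains k = true := by
    rw [PySem.Dict.contains_eq_isSome_get?, h]; rfl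
  rw [PySem.Dict.items_insert_of_contains d v hc]
  have : ∀ p ∈ d.items, (if (p.1 == k) = true then (k, v) else p) = p := by
    intro p hp
    by_cases hpk : p.1 = k
    · have hg := PySem.Dict.get?_of_mem_items d (show (p.1, p.2) ∈ d.items from hp) hnd
      rw [hpk, h] at hg
      simp only [hpk, beq_self_eq_true, if_true]
      have : p.2 = v := by injection hg.symm
      rw [← hpk, ← this]
    · simp [hpk]
  rw [List.map_congr_left this]
  simp

-- A's per-element counting step is the Counter step
theorem countA_eq (p : List (Int × String)) :
    ((p.foldl
      (fun (st : PySem.Dict String Int × Int) value =>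
        (if st.1.contains value.2 = false then st.1.insert value.2 1
         else st.1.modify value.2 0 (· + 1), st.2 + 1))
      (PySem.Dict.empty, 0)).1)
      = PySem.Dict.counter (p.map (fun value => value.2)) := by
  rw [PySem.List.foldl_prod_mk
      (f := fun (d : PySem.Dict String Int) (value : Int × String) =>
        if d.contains value.2 = false then d.insert value.2 1 else d.modify value.2 0 (· + 1))
      (g := fun (i : Int) (_ : Int × String) => i + 1)]
  simp only [PySem.Dict.counter_eq_foldl, List.foldl_map]
  apply PySem.List.foldl_congr_mem
  intro d value _
  by_cases hc : d.contains value.2 = false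
  · rw [if_pos hc]
    simp only [PySem.Dict.modify]
    rw [PySem.Dict.getD_of_not_contains d 0 hc]
    norm_num
  · rw [if_neg hc]

-- a nonempty prefix slice, written as a take
theorem slice_eq_take (xs : List (Int × String)) (t : Int) :
    PySem.List.slice xs none (some t) = xs.take (PySem.List.clampIdx xs.length t) := by
  simp only [PySem.List.slice]
  simp

-- shrinking the threshold by one: same slice (t > len) or drop the last element
theorem slice_pred (xs : List (Int × String)) (t : Int)
    (h : PySem.List.slice xs none (some t) ≠ []) :
    PySem.List.slice xs none (some (t - 1))
      = if (xs.length : Int) < t then PySem.List.slice xs none (some t)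
        else (PySem.List.slice xs none (some t)).dropLast := by
  have hpos := pv_slice_ne_nil_pos xs t h
  rw [slice_eq_take] at h ⊢
  rw [slice_eq_take]
  have hk : PySem.List.clampIdx xs.length t ≠ 0 := by
    intro h0; rw [h0] at h; simp at h
  simp only [PySem.List.clampIdx] at hk
  by_cases hbig : (xs.length : Int) < t
  · rw [if_pos hbig]
    congr 1
    simp only [PySem.List.clampIdx]
    split_ifs <;> omega
  · rw [if_neg hbig]
    have hklen : PySem.List.clampIdx xs.length t ≤ xs.length := by
      simp only [PySem.List.clampIdx]; split_ifs <;> omega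
    have hk1 : PySem.List.clampIdx xs.length (t - 1) = PySem.List.clampIdx xs.length t - 1 := by
      simp only [PySem.List.clampIdx]
      split_ifs at hk ⊢ <;> omega
    rw [hk1]
    by_cases hlt : PySem.List.clampIdx xs.length t < xs.length
    · rw [List.dropLast_take hlt]
    · have hEq : PySem.List.clampIdx xs.length t = xs.length := by omega
      rw [hEq]
      simp [List.dropLast_eq_take]

-- popping the last label and decrementing its count undoes the last Counter step
theorem counter_decStep (ls : List String) (h : ls ≠ []) :
    (if (PySem.Dict.counter ls).getD (ls.getLast h) 0 = 1
     then (PySem.Dict.counter ls).erase (ls.getLast h)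
     else (PySem.Dict.counter ls).insert (ls.getLast h)
            ((PySem.Dict.counter ls).getD (ls.getLast h) 0 - 1))
      = PySem.Dict.counter ls.dropLast := by
  set x := ls.getLast h with hx
  set u := ls.dropLast with hu
  have hsplit : ls = u ++ [x] := (List.dropLast_concat_getLast h).symm
  rw [hsplit, PySem.Dict.counter_append_singleton]
  simp only [PySem.Dict.modify]
  set cnt : Int := (PySem.Dict.counter u).getD x 0 with hcnt
  have hcount : cnt = (u.count x : Int) := PySem.Dict.getD_counter u x
  rw [PySem.Dict.getD_insert_self]
  by_cases h0 : u.count x = 0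
  · have : cnt + 1 = 1 := by omega
    rw [if_pos this]
    have hnc : (PySem.Dict.counter u).contains x = false := by
      rw [PySem.Dict.contains_counter]
      simp [List.count_eq_zero] at h0
      simpa using h0
    have hcz : cnt = 0 := by omega
    rw [hcz]
    apply PySem.Dict.ext
    simp only [PySem.Dict.erase]
    rw [PySem.Dict.items_insert_of_not_contains _ _ hnc]
    rw [List.filter_append]
    have h1 : List.filter (fun p => !p.1 == x) [(x, (0 : Int) + 1)] = [] := by simp
    have h2 : List.filter (fun p => !p.1 == x) (PySem.Dict.counter u).items
        = (PySem.Dict.counter u).items := by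
      rw [List.filter_eq_self]
      intro p hp
      have hpk : p.1 ∈ (PySem.Dict.counter u).keys := by
        simp only [PySem.Dict.keys]
        exact List.mem_map_of_mem hp
      rw [PySem.Dict.keys_counter, PySem.Set.mem_ofList] at hpk
      have : p.1 ≠ x := by
        intro he; rw [he] at hpk
        exact absurd (List.count_pos_iff.mpr hpk) (by omega)
      simp [this]
    rw [h1, h2, List.append_nil]
  · have hpos : 0 < u.count x := Nat.pos_of_ne_zero h0
    have : ¬ (cnt + 1 = 1) := by omega
    rw [if_neg this]
    have harith : cnt + 1 - 1 = cnt := by ring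
    rw [harith, PySem.Dict.insert_insert_self]
    apply insert_same _ _ _ (PySem.Dict.nodup_keys_counter u)
    have hc : (PySem.Dict.counter u).contains x = true := by
      rw [PySem.Dict.contains_counter]
      have := List.count_pos_iff.mp hpos
      simpa using this
    rw [PySem.Dict.contains_eq_isSome_get?] at hc
    cases hg : (PySem.Dict.counter u).get? x with
    | none => rw [hg] at hc; simp at hc
    | some w =>
      have : (PySem.Dict.counter u).getD x 0 = w := by
        simp [PySem.Dict.getD, hg]
      rw [← hcnt] at this
      rw [this]

-- Pre_ says exactly that the prefix slice is nonempty
theorem pre_slice (array_dist : List (Int × String)) (threshold : Int)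
    (hp : Pre_label_prediction array_dist threshold) :
    PySem.List.slice array_dist none (some threshold) ≠ [] := by
  unfold Pre_label_prediction at hp
  rw [slice_eq_take]
  intro he
  have hlen := congrArg List.length he
  simp only [List.length_take, List.length_nil] at hlen
  simp only [PySem.List.clampIdx] at hlen
  by_cases ht : 0 < threshold
  · rw [if_pos ht] at hp
    have : array_dist.length ≠ 0 := by
      intro h0; exact hp (List.length_eq_zero_iff.mp h0)
    split_ifs at hlen <;> omega
  · rw [if_neg ht] at hp
    split_ifs at hlen <;> omega

theorem alt_eq (array_dist : List (Int × String)) (threshold : Int) :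
    label_prediction_alt array_dist threshold
      = bLoop ((PySem.List.slice array_dist none (some threshold)).map (fun value => value.2))
          (PySem.Dict.counter ((PySem.List.slice array_dist none (some threshold)).map (fun value => value.2))) := by
  rfl

-- a Dict with nonempty keys has nonempty items
theorem items_ne_nil_of_keys {d : PySem.Dict String Int} (h : d.keys ≠ []) : d.items ≠ [] := by
  intro hi
  apply h
  simp only [PySem.Dict.keys, hi, List.map_nil]

-- first max scan over a Dict's items, combined: value of bScan's fold
theorem scan_char (d : PySem.Dict String Int) (hnd : d.keys.Nodup) (mc : String)
    (hmk : pyMaxKey d = some mc) :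
    d.items.foldl bStep (none, true)
        = (some (mc, d.getD mc 0), decide (d.items.countP (fun p => p.2 == d.getD mc 0) = 1))
      ∧ (mc, d.getD mc 0) ∈ d.items ∧ ∀ p ∈ d.items, p.2 ≤ d.getD mc 0 := by
  have hitems := PySem.Dict.items_eq_map_keys d hnd 0
  have hkne : d.keys ≠ [] := by
    intro h0
    rw [pyMaxKey_none_of_keys_nil d h0] at hmk
    simp at hmk
  have hine : d.items ≠ [] := items_ne_nil_of_keys hkne
  have hcorr := corr_fold (fun k => d.getD k 0) d (fun _ => rfl) d.keys none true
  rw [← hitems, ← pyMaxKey_eq, hmk] at hcorr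
  simp only [Option.map_none, Option.map_some] at hcorr
  obtain ⟨k', M', hbeq, hbmem, hble⟩ := bchar d.items hine
  have h1 : (d.items.foldl bStep (none, true)).1 = some (k', M') := by rw [hbeq]
  rw [hcorr] at h1
  have h3 := Option.some.inj h1
  have hk1 : k' = mc := (congrArg Prod.fst h3).symm
  have hk2 : M' = d.getD mc 0 := (congrArg Prod.snd h3).symm
  subst hk1; subst hk2
  exact ⟨hbeq, hbmem, hble⟩

-- one unfolding of B's loop: unique max returns its key …
theorem bLoop_ret (labels : List String) (count : PySem.Dict String Int) (q : String × Int)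
    (hflag : (bScan count).2 = true) (hsome : (bScan count).1 = some q) :
    bLoop labels count = q.1 := by
  rw [bLoop.eq_def]
  simp [hflag, hsome]

-- … and a tie pops the last label and decrements its count
theorem bLoop_step (labels : List String) (count : PySem.Dict String Int)
    (hflag : (bScan count).2 = false) (hne : labels ≠ []) :
    bLoop labels count
      = bLoop labels.dropLast
          (if count.getD (labels.getLast hne) 0 = 1 then count.erase (labels.getLast hne)
           else count.insert (labels.getLast hne) (count.getD (labels.getLast hne) 0 - 1)) := by
  cases labels with
  | nil => exact absurd rfl hne
  | cons x xs =>
    conv_lhs => rw [bLoop.eq_def]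
    simp [hflag]

theorem pv_main (N : Nat) : ∀ (array_dist : List (Int × String)) (threshold : Int),
    (threshold + array_dist.length).toNat ≤ N →
    PySem.List.slice array_dist none (some threshold) ≠ [] →
    label_prediction array_dist threshold =
      bLoop ((PySem.List.slice array_dist none (some threshold)).map (fun value => value.2))
        (PySem.Dict.counter ((PySem.List.slice array_dist none (some threshold)).map (fun value => value.2))) := by
  induction N with
  | zero =>
    intro arr t hN hs
    have := pv_slice_ne_nil_pos arr t hs
    omega
  | succ N ih =>
    intro arr t hN hs
    have hpos := pv_slice_ne_nil_pos arr t hs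
    rw [label_prediction]
    simp only [countA_eq]
    set p := PySem.List.slice arr none (some t) with hp
    set ls := p.map (fun value => value.2) with hlsdef
    set d := PySem.Dict.counter ls with hd
    have hlsne : ls ≠ [] := by
      simp only [hlsdef, ne_eq, List.map_eq_nil_iff]
      exact hs
    have hnd : d.keys.Nodup := PySem.Dict.nodup_keys_counter ls
    have hkne : d.keys ≠ [] := by
      rw [hd, PySem.Dict.keys_counter]
      obtain ⟨x, hx⟩ := List.exists_mem_of_ne_nil ls hlsne
      exact List.ne_nil_of_mem ((PySem.Set.mem_ofList ls x).mpr hx)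
    split
    case _ heq =>
      rw [countA_eq] at heq
      obtain ⟨r, hr⟩ := pyMaxKey_isSome d hkne
      rw [heq] at hr
      simp at hr
    case _ mc hmk =>
      rw [countA_eq] at hmk
      obtain ⟨hflag, hmemi, hlei⟩ := scan_char d hnd mc hmk
      set M := d.getD mc 0 with hM
      -- key mc occurs exactly once among the items
      have hmckeys : mc ∈ d.keys := by
        simp only [PySem.Dict.keys]
        exact List.mem_map_of_mem hmemi
      have ckey : d.items.countP (fun q => q.1 == mc) = 1 := by
        have h1 : d.keys.count mc = 1 := List.count_eq_one_of_mem hnd hmckeys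
        simpa only [PySem.Dict.keys, List.count_eq_countP, List.countP_map] using h1
      have hfilter : d.items.filter (fun q => q.1 == mc) = [(mc, M)] := by
        have hlen : (d.items.filter (fun q => q.1 == mc)).length = 1 := by
          rw [← List.countP_eq_length_filter]; exact ckey
        obtain ⟨a, ha⟩ := List.length_eq_one_iff.mp hlen
        have hain : a ∈ d.items.filter (fun q => q.1 == mc) := by rw [ha]; simp
        have ha1 : a.1 = mc := by
          have := List.of_mem_filter hain
          simpa using this
        have hamem : a ∈ d.items := List.mem_of_mem_filter hain
        have hga := PySem.Dict.get?_of_mem_items d (show (a.1, a.2) ∈ d.items from hamem) hnd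
        have hgm := PySem.Dict.get?_of_mem_items d hmemi hnd
        rw [ha1] at hga
        rw [hga] at hgm
        have ha2 : a.2 = M := Option.some.inj hgm
        rw [ha, show a = (mc, M) from Prod.ext ha1 ha2]
      have hperm := List.filter_append_perm (fun q => q.1 == mc) d.items
      have hsplitc : d.items.countP (fun q => q.2 == M)
          = 1 + ((d.erase mc).items.countP (fun q => q.2 == M)) := by
        have := (hperm.countP_eq (fun q => q.2 == M)).symm
        rw [List.countP_append, hfilter] at this
        simpa [PySem.Dict.erase] using this
      split
      case _ hmk2 =>
        -- second max over the emptied dict: count is a singleton, the max is unique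
        have hrkeys : (d.erase mc).keys = [] := by
          by_contra hrk
          obtain ⟨r, hr⟩ := pyMaxKey_isSome (d.erase mc) hrk
          rw [hmk2] at hr
          simp at hr
        have hrempty : (d.erase mc).items = [] := by
          simpa only [PySem.Dict.keys, List.map_eq_nil_iff] using hrkeys
        have ctot : d.items.countP (fun q => q.2 == M) = 1 := by
          rw [hsplitc, hrempty]; simp
        rw [bLoop_ret ls d (mc, M) (by simp [bScan_eq, hflag, ctot]) (by simp [bScan_eq, hflag])]
      case _ k2 hmk2 =>
        have hrnd : (d.erase mc).keys.Nodup := by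
          simp only [PySem.Dict.keys, PySem.Dict.erase]
          exact (List.Sublist.map _ List.filter_sublist).nodup hnd
        obtain ⟨hflag2, hmem2, hle2⟩ := scan_char (d.erase mc) hrnd k2 hmk2
        set M2 := (d.erase mc).getD k2 0 with hM2
        have hsub : ∀ q ∈ (d.erase mc).items, q ∈ d.items := by
          intro q hq
          simp only [PySem.Dict.erase] at hq
          exact List.mem_of_mem_filter hq
        have hM2le : M2 ≤ M := hlei _ (hsub _ hmem2)
        split_ifs with hcond
        · -- the runner-up count differs: unique maximum, A returns most_common
          have hcR : (d.erase mc).items.countP (fun q => q.2 == M) = 0 := by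
            rw [List.countP_eq_zero]
            intro q hq
            have h1 := hle2 q hq
            have h2 : M2 < M := lt_of_le_of_ne hM2le hcond
            simp only [beq_iff_eq]
            omega
          have ctot : d.items.countP (fun q => q.2 == M) = 1 := by rw [hsplitc, hcR]
          rw [bLoop_ret ls d (mc, M) (by simp [bScan_eq, hflag, ctot]) (by simp [bScan_eq, hflag])]
        · -- tie: both sides shrink and recurse
          rw [not_not] at hcond
          have hcR : 1 ≤ (d.erase mc).items.countP (fun q => q.2 == M) :=
            List.countP_pos_iff.mpr ⟨(k2, M2), hmem2, by simp [hcond]⟩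
          have ctot : 2 ≤ d.items.countP (fun q => q.2 == M) := by omega
          have hflagF : (bScan d).2 = false := by
            rw [bScan_eq, hflag]
            simp
            omega
          by_cases hbig : (arr.length : Int) < t
          · -- threshold exceeds the list: the slice is unchanged
            have hslice : PySem.List.slice arr none (some (t - 1)) = p := by
              rw [slice_pred arr t hs, if_pos hbig]
            have hrec := ih arr (t - 1) (by omega) (by rw [hslice]; exact hs)
            rw [hslice] at hrec
            exact hrec
          · -- the slice loses its last element; B pops it and decrements its count
            have hslice : PySem.List.slice arr none (some (t - 1)) = p.dropLast := by
              rw [slice_pred arr t hs, if_neg hbig]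
            have hlen2 : 2 ≤ ls.length := by
              have h1 : d.items.countP (fun q => q.2 == M) ≤ d.items.length :=
                List.countP_le_length
              have h2 : d.items.length = d.keys.length := by
                simp [PySem.Dict.keys]
              have h3 : d.keys.length ≤ ls.length := by
                rw [hd, PySem.Dict.keys_counter]
                exact PySem.Set.length_ofList_le ls
              omega
            have hplen : 2 ≤ p.length := by
              have : ls.length = p.length := by rw [hlsdef]; simp
              omega
            have hdlne : p.dropLast ≠ [] := by
              have : p.dropLast.length = p.length - 1 := List.length_dropLast
              intro h0
              rw [h0] at this
              simp at this
              omega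
            have hrec := ih arr (t - 1) (by omega) (by rw [hslice]; exact hdlne)
            rw [hslice] at hrec
            have hmapd : p.dropLast.map (fun value => value.2) = ls.dropLast := by
              rw [hlsdef, List.map_dropLast]
            rw [hmapd] at hrec
            rw [hrec, ← counter_decStep ls hlsne]
            exact (bLoop_step ls d hflagF hlsne).symm
  -- ===== VERDICT (by name: the statement is the Claim_ definition above) =====
theorem label_prediction_spec : Claim_equal_label_prediction := by
  intro array_dist threshold _ hp
  unfold Spec_label_prediction
  rw [alt_eq]
  exact pv_main (threshold + array_dist.length).toNat array_dist threshold (le_refl _)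
    (pre_slice array_dist threshold hp)
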